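-- pv_equiv track=rewrite | github.com/jakubZiel/LeetCodeAlgorithms | array/destory_asteroids.py | destroy_asteroids
-- ===== SOURCE A (Python) =====
-- from typing import List
--
-- def destroy_asteroids(asteroids : List[int], mass : int) -> bool:
--     asteroids.sort()
--
--     for asteroid in asteroids:
--         if asteroid <= mass:
--             mass += asteroid
--         else:
--             return False
--     return True
-- ===== SOURCE B (Python) =====
-- def destroy_asteroids(asteroids, mass):
--     asteroids.sort()
--     # Backward pass: compute the minimal initial mass that destroys the whole
--     # (sorted) list.  A suffix starting with asteroid a is destroyable from
--     # mass m iff a <= m and the rest is destroyable from m + a, so the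
--     # threshold obeys required = max(a, required - a); None means "-infinity"
--     # (the empty suffix is destroyable from any mass).
--     required = None
--     for a in reversed(asteroids):
--         required = a if required is None else max(a, required - a)
--     return required is None or mass >= required
-- ===== Notes on version B (the rewrite author's own statement) =====
-- stated objective: alternative
-- what changed: Instead of simulating the greedy forward with a running mass and an early return, B makes one backward pass over the sorted list computing the minimal initial mass required to destroy the whole list (required = max(a, required - a)) and answers with a single comparison mass >= required.
import Mathlib
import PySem

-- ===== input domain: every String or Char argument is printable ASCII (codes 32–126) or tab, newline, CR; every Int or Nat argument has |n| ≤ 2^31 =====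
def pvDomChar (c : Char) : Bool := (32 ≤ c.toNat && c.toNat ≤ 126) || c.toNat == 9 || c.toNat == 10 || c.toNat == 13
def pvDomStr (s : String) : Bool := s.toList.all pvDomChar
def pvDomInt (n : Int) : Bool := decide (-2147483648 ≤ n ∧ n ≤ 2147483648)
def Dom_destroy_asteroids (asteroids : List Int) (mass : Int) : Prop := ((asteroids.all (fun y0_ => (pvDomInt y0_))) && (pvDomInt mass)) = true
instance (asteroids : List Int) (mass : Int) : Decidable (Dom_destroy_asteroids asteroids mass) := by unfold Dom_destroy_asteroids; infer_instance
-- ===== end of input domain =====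

-- B replaces A's forward greedy simulation by a backward pass over the sorted list that
-- computes the minimal initial mass required, answered by one comparison; objective: alternative.
-- Both Pythons sort the argument in place; the equivalence proved is about the return value.


-- ===== PORT A =====
-- loop of A: for asteroid in sorted(asteroids): if asteroid <= mass: mass += asteroid else return False
def destroy_asteroids_loop (l : List Int) (mass : Int) : Bool :=
  match l with
  | [] => true
  | a :: rest => if a ≤ mass then destroy_asteroids_loop rest (mass + a) else false

def destroy_asteroids (asteroids : List Int) (mass : Int) : Bool :=
  destroy_asteroids_loop (PySem.List.sorted asteroids (fun x => x)) mass

-- ===== PORT B =====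
-- B's loop: for a in reversed(sorted): required = a if required is None else max(a, required - a)
def destroy_asteroids_step (req : Option Int) (a : Int) : Option Int :=
  match req with
  | none => some a
  | some r => some (max a (r - a))

def destroy_asteroids_alt (asteroids : List Int) (mass : Int) : Bool :=
  let s := PySem.List.sorted asteroids (fun x => x)
  let required := s.reverse.foldl destroy_asteroids_step (none : Option Int)
  match required with
  | none => true
  | some r => decide (r ≤ mass)

-- ===== PRECONDITION & SPEC =====
def Spec_destroy_asteroids (asteroids : List Int) (mass : Int) (out : Bool) : Prop := out = destroy_asteroids_alt asteroids mass
instance (asteroids : List Int) (mass : Int) (out : Bool) : Decidable (Spec_destroy_asteroids asteroids mass out) := by unfold Spec_destroy_asteroids; infer_instance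

-- ===== CLAIM (what is proved, stated in full; the proofs are below) =====
def Claim_equal_destroy_asteroids : Prop := ∀ (asteroids : List Int) (mass : Int), Dom_destroy_asteroids asteroids mass → Spec_destroy_asteroids asteroids mass (destroy_asteroids asteroids mass)

-- ===== LEMMAS AND PROOFS =====

-- head recursion equivalent to B's fold over the reversed list
def destroy_required (l : List Int) : Option Int :=
  match l with
  | [] => none
  | a :: rest => destroy_asteroids_step (destroy_required rest) a

lemma foldl_reverse_eq_required (l : List Int) :
    l.reverse.foldl destroy_asteroids_step (none : Option Int) = destroy_required l := by
  induction l with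
  | nil => rfl
  | cons a rest ih =>
    simp [destroy_required, List.reverse_cons, List.foldl_append, ih]

lemma loop_eq_required (l : List Int) (mass : Int) :
    destroy_asteroids_loop l mass
      = (match destroy_required l with
         | none => true
         | some r => decide (r ≤ mass)) := by
  induction l generalizing mass with
  | nil => rfl
  | cons a rest ih =>
    simp only [destroy_asteroids_loop, destroy_required, ih]
    cases h : destroy_required rest with
    | none => simp [destroy_asteroids_step]
    | some r =>
      simp only [destroy_asteroids_step]
      by_cases ha : a ≤ mass <;> by_cases hr : r ≤ mass + a <;>
        simp [ha, hr]

-- ===== VERDICT (by name: the statement is the Claim_ definition above) =====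
theorem destroy_asteroids_spec : Claim_equal_destroy_asteroids := by
  intro asteroids mass _
  unfold Spec_destroy_asteroids destroy_asteroids destroy_asteroids_alt
  simp only [foldl_reverse_eq_required]
  exact loop_eq_required _ _
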